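-- pv_equiv track=rewrite | github.com/jerryscript-project/jerryscript | tools/runners/test262-harness.py | my_multiline
-- ===== SOURCE A (Python) =====
-- def my_multiline(lines, preserve_newlines=False):
--     # assume no explcit indentor (otherwise have to parse value)
--     value = ""
--     indent = my_leading_spaces(lines[0])
--     was_empty = None
--
--     while lines:
--         line = lines.pop(0)
--         is_empty = my_is_all_spaces(line)
--
--         if is_empty:
--             if preserve_newlines:
--                 value += "\n"
--         elif my_leading_spaces(line) < indent:
--             lines.insert(0, line)
--             break
--         else:
--             if preserve_newlines:
--                 if was_empty != None:
--                     value += "\n"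
--             else:
--                 if was_empty:
--                     value += "\n"
--                 elif was_empty is False:
--                     value += " "
--             value += line[(indent):]
--
--         was_empty = is_empty
--
--     return (lines, value)
--
-- def my_is_all_spaces(line):
--     return len(line.strip()) == 0
--
-- def my_leading_spaces(line):
--     return len(line) - len(line.lstrip(' '))
-- ===== SOURCE B (Python) =====
-- def my_is_all_spaces(line):
--     return len(line.strip()) == 0
--
-- def my_leading_spaces(line):
--     return len(line) - len(line.lstrip(' '))
--
-- def my_multiline(lines, preserve_newlines=False):
--     # Non-destructive scan to find the end of the block, then one slice and
--     # one pure pass over the block to build the value.  Mutates `lines` in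
--     # place (lines[:] = remainder) so the side effect matches the original.
--     indent = my_leading_spaces(lines[0])
--     end = 0
--     while end < len(lines):
--         line = lines[end]
--         if not my_is_all_spaces(line) and my_leading_spaces(line) < indent:
--             break
--         end += 1
--     block = lines[:end]
--     lines[:] = lines[end:]
--     parts = []
--     was_empty = None
--     for line in block:
--         if my_is_all_spaces(line):
--             if preserve_newlines:
--                 parts.append("\n")
--             was_empty = True
--         else:
--             if preserve_newlines:
--                 if was_empty is not None:
--                     parts.append("\n")
--             elif was_empty:
--                 parts.append("\n")
--             elif was_empty is False:
--                 parts.append(" ")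
--             parts.append(line[indent:])
--             was_empty = False
--     return (lines, "".join(parts))
-- ===== Notes on version B (the rewrite author's own statement) =====
-- stated objective: faster
-- what changed: A destructively pops from and re-inserts at the front of lines (each O(n)) while interleaving value building; B scans non-destructively for the block's end index, splits with two slices (assigning the remainder in place), and builds the value in a separate pure pass that joins a parts list.
-- outside the precondition, e.g. on my_multiline([], False): A raises IndexError, B raises IndexError
import Mathlib
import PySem

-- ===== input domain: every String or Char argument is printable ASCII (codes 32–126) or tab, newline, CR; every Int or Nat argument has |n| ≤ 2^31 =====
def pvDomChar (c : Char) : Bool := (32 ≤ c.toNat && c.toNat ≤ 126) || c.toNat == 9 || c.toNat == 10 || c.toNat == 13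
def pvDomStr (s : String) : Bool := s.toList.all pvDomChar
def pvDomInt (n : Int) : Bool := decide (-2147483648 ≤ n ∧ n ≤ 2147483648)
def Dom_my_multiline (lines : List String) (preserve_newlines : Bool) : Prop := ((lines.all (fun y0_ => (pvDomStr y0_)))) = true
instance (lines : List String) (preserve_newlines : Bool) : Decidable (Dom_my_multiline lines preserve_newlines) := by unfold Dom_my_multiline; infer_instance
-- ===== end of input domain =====

-- B replaces A's destructive pop/insert loop by a non-destructive end-index scan, one
-- slice and a separate pure pass over the block (objective: faster — no quadratic pop(0)/insert(0)).
-- A mutates `lines` in place (pop/insert); B mimics that with lines[:] = remainder —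
-- the equivalence proved here is about the return value.

-- ===== PORT A =====
-- my_is_all_spaces(line): len(line.strip()) == 0
def pvIsAllSpaces (line : String) : Bool := PySem.Chars.len (PySem.Chars.strip line.toList) == 0
-- my_leading_spaces(line): len(line) - len(line.lstrip(' ')); line.lstrip(' ') is
-- exactly dropWhile (· == ' ') on the characters (hand-ported, exact)
def pvLeading (line : String) : Int :=
  (PySem.Str.len line : Int) - ((line.toList.dropWhile (· == ' ')).length : Int)

-- the while-loop of A; strings accumulated as List Char (String.append is opaque to the
-- kernel); state = (remaining lines, value, was_empty : Option Bool)
def myA_loop (preserve_newlines : Bool) (indent : Int) :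
    List String → List Char → Option Bool → List String × List Char
  | [], value, _ => ([], value)
  | line :: rest, value, was_empty =>
    if pvIsAllSpaces line then
      myA_loop preserve_newlines indent rest
        (if preserve_newlines then value ++ ['\n'] else value) (some true)
    else if pvLeading line < indent then
      (line :: rest, value)   -- lines.insert(0, line); break
    else
      let value :=
        if preserve_newlines then
          (if was_empty ≠ none then value ++ ['\n'] else value)
        else
          (if was_empty = some true then value ++ ['\n']
           else if was_empty = some false then value ++ [' '] else value)
      myA_loop preserve_newlines indent rest
        (value ++ PySem.Chars.slice line.toList (some indent) none) (some false)

def my_multiline (lines : List String) (preserve_newlines : Bool) : List String × String :=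
  -- lines[0] raises IndexError on []; Pre_ excludes that, .getD "" is a dummy there
  let indent := pvLeading ((PySem.List.pyGet? lines 0).getD "")
  let r := myA_loop preserve_newlines indent lines [] none
  (r.1, String.ofList r.2)

-- ===== PORT B =====
-- find end = index of first non-empty line with leading spaces < indent
def myB_end (indent : Int) : List String → Nat
  | [] => 0
  | line :: rest =>
    if !pvIsAllSpaces line && decide (pvLeading line < indent) then 0
    else myB_end indent rest + 1

-- pure pass over the block: the list `parts` (each part a List Char)
def myB_build (preserve_newlines : Bool) (indent : Int) :
    List String → Option Bool → List (List Char)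
  | [], _ => []
  | line :: rest, was_empty =>
    if pvIsAllSpaces line then
      (if preserve_newlines then [['\n']] else []) ++
        myB_build preserve_newlines indent rest (some true)
    else
      (if preserve_newlines then
        (if was_empty ≠ none then [['\n']] else [])
       else
        (if was_empty = some true then [['\n']]
         else if was_empty = some false then [[' ']] else [])) ++
      [PySem.Chars.slice line.toList (some indent) none] ++
        myB_build preserve_newlines indent rest (some false)

def my_multiline_alt (lines : List String) (preserve_newlines : Bool) : List String × String :=
  let indent := pvLeading ((PySem.List.pyGet? lines 0).getD "")
  let e := myB_end indent lines
  let block := PySem.List.slice lines none (some (e : Int))     -- lines[:end]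
  let rem := PySem.List.slice lines (some (e : Int)) none       -- lines[end:] (and lines[:] = rem)
  (rem, String.ofList (myB_build preserve_newlines indent block none).flatten)

-- ===== PRECONDITION & SPEC =====
-- Pre_ excludes only the empty list, on which A raises IndexError at lines[0]
def Pre_my_multiline (lines : List String) (preserve_newlines : Bool) : Prop := lines ≠ []
instance (lines : List String) (preserve_newlines : Bool) : Decidable (Pre_my_multiline lines preserve_newlines) := by unfold Pre_my_multiline; infer_instance

def pvWitness_my_multiline : List String × Bool := ([" a", "  b", "", "c"], true)

def Spec_my_multiline (lines : List String) (preserve_newlines : Bool) (out : List String × String) : Prop := out = my_multiline_alt lines preserve_newlines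
instance (lines : List String) (preserve_newlines : Bool) (out : List String × String) : Decidable (Spec_my_multiline lines preserve_newlines out) := by unfold Spec_my_multiline; infer_instance

-- ===== CLAIM (what is proved, stated in full; the proofs are below) =====
def Claim_equal_my_multiline : Prop := ∀ (lines : List String) (preserve_newlines : Bool), Dom_my_multiline lines preserve_newlines → Pre_my_multiline lines preserve_newlines → Spec_my_multiline lines preserve_newlines (my_multiline lines preserve_newlines)

-- ===== LEMMAS AND PROOFS =====

-- the loop of A equals: drop/take at B's end index, value extended by B's flattened parts
theorem myA_loop_eq (preserve_newlines : Bool) (indent : Int) (ls : List String)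
    (value : List Char) (was_empty : Option Bool) :
    myA_loop preserve_newlines indent ls value was_empty =
      (ls.drop (myB_end indent ls),
       value ++ (myB_build preserve_newlines indent (ls.take (myB_end indent ls)) was_empty).flatten) := by
  induction ls generalizing value was_empty with
  | nil => simp [myA_loop, myB_end, myB_build]
  | cons line rest ih =>
    by_cases hsp : pvIsAllSpaces line
    · simp only [myA_loop, myB_end, hsp, if_pos, Bool.not_true, Bool.false_and,
        Bool.false_eq_true, if_false, ih]
      by_cases hp : preserve_newlines <;> simp [myB_build, hsp, hp]
    · by_cases hlt : pvLeading line < indent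
      · simp [myA_loop, myB_end, myB_build, hsp, hlt]
      · simp only [myA_loop, myB_end, hsp, hlt, decide_false, Bool.not_false,
          Bool.true_and, if_false, ih]
        by_cases hp : preserve_newlines
        · by_cases hw : was_empty = none <;> simp [myB_build, hsp, hp, hw]
        · rcases was_empty with _ | b
          · simp [myB_build, hsp, hp]
          · cases b <;> simp [myB_build, hsp, hp]

-- ===== VERDICT (by name: the statement is the Claim_ definition above) =====
theorem my_multiline_spec : Claim_equal_my_multiline := by
  intro lines preserve_newlines _ _
  unfold Spec_my_multiline my_multiline my_multiline_alt
  simp only [myA_loop_eq, PySem.List.slice_from_natCast, PySem.List.slice_to_natCast]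
  simp
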